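-- pv_equiv track=rewrite | github.com/LuizCarlosIFBA/Gest-o-de-Seguran-a-da-Informa-o | Atividade 3/FNV_1A_32_64_128_bits.py | fnv1a_hash_32
-- ===== SOURCE A (Python) =====
-- def fnv1a_hash_32(text: str, seed: int = 0x811c9dc5) -> int:
--     """
--     Calculate the 32-bit FNV-1a hash for a given text.
--
--     Parameters:
--     - text: The input text to hash.
--     - seed: The initial hash value. Default is the FNV offset basis.
--
--     Returns:
--     - The 32-bit FNV-1a hash of the input text.
--     """
--     fnv_prime = 0x01000193
--     hash_value = seed
--
--     text_bytes = text.encode('utf-8')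
--
--     for byte in text_bytes:
--         hash_value ^= byte
--         hash_value *= fnv_prime
--         hash_value &= 0xffffffff  # Ensure hash_value is a 32-bit number
--
--     return hash_value
-- ===== SOURCE B (Python) =====
-- def fnv1a_hash_32(text: str, seed: int = 0x811c9dc5) -> int:
--     """32-bit FNV-1a via divide-and-conquer over the byte range (depth O(log n))."""
--     data = text.encode('utf-8')
--
--     def go(lo: int, hi: int, h: int) -> int:
--         if hi - lo == 0:
--             return h
--         if hi - lo == 1:
--             return ((h ^ data[lo]) * 0x01000193) & 0xffffffff
--         mid = (lo + hi) // 2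
--         return go(mid, hi, go(lo, mid, h))
--
--     return go(0, len(data), seed)
-- ===== Notes on version B (the rewrite author's own statement) =====
-- stated objective: alternative
-- what changed: Replaces the linear byte loop with a divide-and-conquer recursion that splits the byte range in halves and threads the hash through the two halves (recursion depth O(log n) instead of a sequential loop).
import Mathlib
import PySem

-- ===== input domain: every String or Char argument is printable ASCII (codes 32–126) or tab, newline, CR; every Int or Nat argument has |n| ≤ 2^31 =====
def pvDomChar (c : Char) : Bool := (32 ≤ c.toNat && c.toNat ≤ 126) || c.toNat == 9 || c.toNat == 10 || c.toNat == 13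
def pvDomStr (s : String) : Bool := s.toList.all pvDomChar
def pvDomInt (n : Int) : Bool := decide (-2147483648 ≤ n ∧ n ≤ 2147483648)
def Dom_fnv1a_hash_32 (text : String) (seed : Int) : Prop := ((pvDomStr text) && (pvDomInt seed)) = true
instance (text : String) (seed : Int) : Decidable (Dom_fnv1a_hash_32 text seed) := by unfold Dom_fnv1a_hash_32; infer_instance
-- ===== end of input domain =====

-- B replaces A's linear byte loop by a divide-and-conquer recursion over the byte range
-- (same values, depth O(log n)); alternative decomposition, no speed claim.

-- ===== PORT A =====
-- text.encode('utf-8'): on the ASCII domain each character is one byte equal to its code point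
def pvBytes (text : String) : List Int := text.toList.map (fun c => (c.toNat : Int))

-- A's for-loop: hash ^= byte; hash *= 0x01000193; hash &= 0xffffffff
def pvLoopA : List Int → Int → Int
  | [], h => h
  | b :: rest, h => pvLoopA rest (PySem.Int.band (PySem.Int.bxor h b * 16777619) 4294967295)

def fnv1a_hash_32 (text : String) (seed : Int) : Int :=
  pvLoopA (pvBytes text) seed

-- ===== PORT B =====
-- B's go(lo, hi, h): split [lo, hi) at mid, hash left half then right half
-- data[lo] is ported as getD (indices are always in range here)
def pvGoB (data : List Int) (lo hi : Nat) (h : Int) : Int :=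
  if hi - lo = 0 then h
  else if hi - lo = 1 then PySem.Int.band (PySem.Int.bxor h (data.getD lo 0) * 16777619) 4294967295
  else
    let mid := (lo + hi) / 2
    pvGoB data mid hi (pvGoB data lo mid h)
termination_by hi - lo
decreasing_by all_goals omega

def fnv1a_hash_32_alt (text : String) (seed : Int) : Int :=
  pvGoB (pvBytes text) 0 (pvBytes text).length seed

-- ===== PRECONDITION & SPEC =====
def Spec_fnv1a_hash_32 (text : String) (seed : Int) (out : Int) : Prop := out = fnv1a_hash_32_alt text seed
instance (text : String) (seed : Int) (out : Int) : Decidable (Spec_fnv1a_hash_32 text seed out) := by unfold Spec_fnv1a_hash_32; infer_instance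

-- ===== CLAIM (what is proved, stated in full; the proofs are below) =====
def Claim_equal_fnv1a_hash_32 : Prop := ∀ (text : String) (seed : Int), Dom_fnv1a_hash_32 text seed → Spec_fnv1a_hash_32 text seed (fnv1a_hash_32 text seed)

-- ===== LEMMAS AND PROOFS =====
theorem pvLoopA_append (xs ys : List Int) (h : Int) :
    pvLoopA (xs ++ ys) h = pvLoopA ys (pvLoopA xs h) := by
  induction xs generalizing h with
  | nil => rfl
  | cons b rest ih => simp [pvLoopA, ih]

theorem pvGoB_eq (n : Nat) : ∀ (data : List Int) (lo hi : Nat) (h : Int),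
    hi - lo = n → hi ≤ data.length →
    pvGoB data lo hi h = pvLoopA ((data.drop lo).take (hi - lo)) h := by
  induction n using Nat.strong_induction_on with
  | _ n ih =>
    intro data lo hi h hn hlen
    rw [pvGoB]
    by_cases h0 : hi - lo = 0
    · simp [h0, pvLoopA]
    · by_cases h1 : hi - lo = 1
      · have hlo : lo < data.length := by omega
        have hd : data.drop lo = data[lo] :: data.drop (lo+1) := List.drop_eq_getElem_cons hlo
        rw [if_neg h0, if_pos h1, h1, hd]
        simp only [List.take_succ_cons, List.take_zero, pvLoopA,
          List.getD_eq_getElem?_getD, List.getElem?_eq_getElem hlo, Option.getD_some]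
      · rw [if_neg h0, if_neg h1]
        have hm2 : 2 ≤ hi - lo := by omega
        have hlm : lo < (lo + hi) / 2 := by omega
        have hmh : (lo + hi) / 2 < hi := by omega
        set mid := (lo + hi) / 2 with hmid
        show pvGoB data mid hi (pvGoB data lo mid h) = pvLoopA (List.take (hi - lo) (List.drop lo data)) h
        rw [ih (mid - lo) (by omega) data lo mid h rfl (by omega),
            ih (hi - mid) (by omega) data mid hi _ rfl hlen]
        have hsplit : (data.drop lo).take (hi - lo)
            = (data.drop lo).take (mid - lo) ++ (data.drop mid).take (hi - mid) := by
          have hsum : hi - lo = (mid - lo) + (hi - mid) := by omega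
          have hdd : lo + (mid - lo) = mid := by omega
          rw [hsum, List.take_add, List.drop_drop, hdd]
        rw [hsplit, pvLoopA_append]

-- ===== VERDICT (by name: the statement is the Claim_ definition above) =====
theorem fnv1a_hash_32_spec : Claim_equal_fnv1a_hash_32 := by
  intro text seed _
  unfold Spec_fnv1a_hash_32 fnv1a_hash_32 fnv1a_hash_32_alt
  rw [pvGoB_eq ((pvBytes text).length) (pvBytes text) 0 (pvBytes text).length seed (by omega) le_rfl]
  simp
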